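-- pv_equiv track=rewrite | github.com/swisskanton/javascript | zero_plentifulArray.py | zero_plentiful
-- ===== SOURCE A (Python) =====
-- def zero_plentiful(arr):
--     if len(arr) < 4:
--         return 0
--     count = 0
--     result = 0
--     for x in arr:
--         if x == 0:
--             count += 1
--             if count == 4:
--                 result += 1
--         else:
--             if count > 0 and count < 4:
--                 return 0
--             count = 0
--     return result if count == 0 or count > 3 else 0
-- ===== SOURCE B (Python) =====
-- def zero_plentiful(arr):
--     if len(arr) < 4:
--         return 0
--     # Phase 1: run-length encode the maximal runs of zeros.
--     runs = []
--     c = 0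
--     for x in arr:
--         if x == 0:
--             c += 1
--         else:
--             if c > 0:
--                 runs.append(c)
--             c = 0
--     if c > 0:
--         runs.append(c)
--     # Phase 2: decide over the run-length table.
--     if any(r < 4 for r in runs):
--         return 0
--     return sum(1 for r in runs if r >= 4)
-- ===== Notes on version B (the rewrite author's own statement) =====
-- stated objective: idiomatic
-- what changed: B first builds the run-length table of maximal zero-runs, then makes a separate decision pass over that table (any short run -> 0, else count of long runs), instead of A's fused state-machine scan with early return and an in-loop result counter.
import Mathlib
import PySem

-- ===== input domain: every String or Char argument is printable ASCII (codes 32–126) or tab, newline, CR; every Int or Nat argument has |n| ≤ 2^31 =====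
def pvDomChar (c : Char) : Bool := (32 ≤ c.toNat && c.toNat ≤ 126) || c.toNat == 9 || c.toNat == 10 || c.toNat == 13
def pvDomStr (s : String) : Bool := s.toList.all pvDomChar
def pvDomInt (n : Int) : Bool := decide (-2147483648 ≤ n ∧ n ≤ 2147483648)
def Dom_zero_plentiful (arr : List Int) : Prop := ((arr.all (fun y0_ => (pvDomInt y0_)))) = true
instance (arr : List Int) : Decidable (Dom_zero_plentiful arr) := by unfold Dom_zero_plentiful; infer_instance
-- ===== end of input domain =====

-- B builds the run-length table of zero-runs first and decides over it, instead of A's fused scan with early return (objective: idiomatic decomposition).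

-- ===== PORT A =====
-- the for-loop of A, carrying (count, result); returning 0 mid-loop is the 'return 0' branch
def zpLoopA : List Int → Int → Int → Int
  | [], count, result => if count = 0 ∨ count > 3 then result else 0
  | x :: xs, count, result =>
    if x = 0 then
      let count' := count + 1
      zpLoopA xs count' (if count' = 4 then result + 1 else result)
    else
      if count > 0 ∧ count < 4 then 0
      else zpLoopA xs 0 result

def zero_plentiful (arr : List Int) : Int :=
  if arr.length < 4 then 0 else zpLoopA arr 0 0

-- ===== PORT B =====
-- phase 1 of B: run-length encode the maximal zero-runs (c = current run, runs = completed runs)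
def zpRuns : List Int → Int → List Int → List Int
  | [], c, runs => if c > 0 then runs ++ [c] else runs
  | x :: xs, c, runs =>
    if x = 0 then zpRuns xs (c + 1) runs
    else zpRuns xs 0 (if c > 0 then runs ++ [c] else runs)

-- phase 2 of B: the decision over the run table
def zpDecide (runs : List Int) : Int :=
  if runs.any (fun r => decide (r < 4)) then 0
  else ((runs.filter (fun r => decide (4 ≤ r))).length : Int)

def zero_plentiful_alt (arr : List Int) : Int :=
  if arr.length < 4 then 0 else zpDecide (zpRuns arr 0 [])

-- ===== PRECONDITION & SPEC =====
def Spec_zero_plentiful (arr : List Int) (out : Int) : Prop := out = zero_plentiful_alt arr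
instance (arr : List Int) (out : Int) : Decidable (Spec_zero_plentiful arr out) := by unfold Spec_zero_plentiful; infer_instance

-- ===== CLAIM (what is proved, stated in full; the proofs are below) =====
def Claim_equal_zero_plentiful : Prop := ∀ (arr : List Int), Dom_zero_plentiful arr → Spec_zero_plentiful arr (zero_plentiful arr)

-- ===== LEMMAS AND PROOFS =====

-- accumulated runs stay in the encoding
theorem mem_zpRuns (xs : List Int) (c : Int) (runs : List Int) (r : Int)
    (h : r ∈ runs) : r ∈ zpRuns xs c runs := by
  induction xs generalizing c runs with
  | nil =>
    simp only [zpRuns]; split <;> simp [h]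
  | cons x xs ih =>
    simp only [zpRuns]
    split
    · exact ih _ _ h
    · apply ih
      split <;> simp [h]

-- a short accumulated run forces decision 0
theorem zpDecide_short (runs : List Int) (r : Int) (hr : r ∈ runs) (h : r < 4) :
    zpDecide runs = 0 := by
  unfold zpDecide
  have : runs.any (fun r => decide (r < 4)) = true := by
    simp only [List.any_eq_true]
    exact ⟨r, hr, by simpa using h⟩
  simp [this]

-- main invariant: A's loop from state (c, k) equals B's decision of the encoding,
-- provided all completed runs are long and k counts them (plus the current run if already long)
theorem zp_main (xs : List Int) (c : Int) (runs : List Int)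
    (hruns : ∀ r ∈ runs, 4 ≤ r) (hc : 0 ≤ c) :
    zpLoopA xs c ((runs.length : Int) + (if 4 ≤ c then 1 else 0))
      = zpDecide (zpRuns xs c runs) := by
  induction xs generalizing c runs with
  | nil =>
    simp only [zpLoopA, zpRuns]
    by_cases h0 : c = 0
    · subst h0
      norm_num
      unfold zpDecide
      have hany : runs.any (fun r => decide (r < 4)) = false := by
        simp only [List.any_eq_false]
        intro r hr; simpa using not_lt.mpr (hruns r hr)
      have hfil : runs.filter (fun r => decide (4 ≤ r)) = runs := by
        apply List.filter_eq_self.mpr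
        intro r hr; simpa using hruns r hr
      simp [hany, hfil]
    · by_cases h4 : c > 3
      · have hc4 : 4 ≤ c := by omega
        simp only [if_pos (Or.inr h4), if_pos hc4, if_pos (show c > 0 by omega)]
        unfold zpDecide
        have hruns' : ∀ r ∈ runs ++ [c], 4 ≤ r := by
          intro r hr
          rcases List.mem_append.mp hr with h | h
          · exact hruns r h
          · simp at h; omega
        have hany : (runs ++ [c]).any (fun r => decide (r < 4)) = false := by
          simp only [List.any_eq_false]
          intro r hr; simpa using not_lt.mpr (hruns' r hr)
        have hfil : (runs ++ [c]).filter (fun r => decide (4 ≤ r)) = runs ++ [c] := by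
          apply List.filter_eq_self.mpr
          intro r hr; simpa using hruns' r hr
        simp [hany, hfil]
      · -- 1 ≤ c ≤ 3: both 0
        have : ¬ (c = 0 ∨ c > 3) := by omega
        simp only [if_neg this, if_pos (show c > 0 by omega)]
        rw [zpDecide_short (runs ++ [c]) c (by simp) (by omega)]
  | cons x xs ih =>
    simp only [zpLoopA, zpRuns]
    by_cases hx : x = 0
    · simp only [if_pos hx]
      have := ih (c + 1) runs hruns (by omega)
      by_cases h3 : c + 1 = 4
      · have h1 : ¬ 4 ≤ c := by omega
        have h2 : (4:Int) ≤ c + 1 := by omega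
        rw [if_neg h1]
        rw [if_pos h2] at this
        simpa [h3] using this
      · have heq : (if 4 ≤ c + 1 then (1:Int) else 0) = (if 4 ≤ c then 1 else 0) := by
          split <;> split <;> omega
        rw [heq] at this
        simpa [h3] using this
    · simp only [if_neg hx]
      by_cases hshort : c > 0 ∧ c < 4
      · simp only [if_pos hshort]
        have hmem : c ∈ zpRuns xs 0 (runs ++ [c]) :=
          mem_zpRuns _ _ _ _ (by simp)
        rw [if_pos (show c > 0 from hshort.1),
            zpDecide_short _ c hmem (by omega)]
      · simp only [if_neg hshort]
        by_cases hc0 : c = 0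
        · subst hc0
          have := ih 0 runs hruns le_rfl
          simpa using this
        · have hc4 : 4 ≤ c := by omega
          have hruns' : ∀ r ∈ runs ++ [c], 4 ≤ r := by
            intro r hr
            rcases List.mem_append.mp hr with h | h
            · exact hruns r h
            · simp at h; omega
          have := ih 0 (runs ++ [c]) hruns' le_rfl
          simp only [List.length_append, List.length_singleton] at this
          rw [if_pos (show c > 0 by omega), if_pos hc4]
          push_cast at this
          simpa using this

-- ===== VERDICT (by name: the statement is the Claim_ definition above) =====
theorem zero_plentiful_spec : Claim_equal_zero_plentiful := by
  intro arr _
  unfold Spec_zero_plentiful zero_plentiful zero_plentiful_alt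
  by_cases h : arr.length < 4
  · simp [h]
  · simp only [if_neg h]
    have := zp_main arr 0 [] (by simp) le_rfl
    simpa using this
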